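-- pv_equiv track=rewrite | github.com/liaochunho/ZIP-Cracker | zipcracker_dialogs.py | simple_rule_test
-- ===== SOURCE A (Python) =====
-- def simple_rule_test(rule, words):
--     """简单的内置规则测试，支持基本规则
--
--     Args:
--         rule: 要测试的规则
--         words: 输入词汇列表
--
--     Returns:
--         str: 测试结果
--     """
--     results = []
--
--     for word in words:
--         result = word
--
--         # 实现一些基本规则
--         if rule == ":l":  # 全部小写
--             result = word.lower()
--         elif rule == ":u":  # 全部大写
--             result = word.upper()
--         elif rule == ":c":  # 首字母大写
--             result = word.capitalize()
--         elif rule == "r":  # 反转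
--             result = word[::-1]
--         elif rule == "d":  # 重复
--             result = word + word
--         elif rule == "t":  # 大小写转换
--             result = ''.join([c.lower() if c.isupper() else c.upper() for c in word])
--         elif rule == "{":  # 左旋转
--             result = word[1:] + word[0] if word else word
--         elif rule == "}":  # 右旋转
--             result = word[-1] + word[:-1] if word else word
--         elif rule == "[":  # 删除首字符
--             result = word[1:] if word else word
--         elif rule == "]":  # 删除末字符
--             result = word[:-1] if word else word
--         elif rule.startswith("$"):  # 在末尾添加字符
--             result = word + rule[1:]
--         elif rule.startswith("^"):  # 在开头添加字符
--             result = rule[1:] + word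
--
--         results.append(f"{word} -> {result}")
--
--     return "\n".join(results)
-- ===== SOURCE B (Python) =====
-- def simple_rule_test(rule, words):
--     """Uniform gather engine: the rule is compiled to an index-selection over the
--     word's positions plus a position-aware per-character map and optional affixes;
--     every word is then produced by one generic gather pass (no per-rule string ops)."""
--     def sel(n):
--         rng = list(range(n))
--         if rule == "r":
--             return rng[::-1]
--         if rule == "d":
--             return rng + rng
--         if rule == "{":
--             return rng[1:] + rng[:1]
--         if rule == "}":
--             return rng[-1:] + rng[:-1]
--         if rule == "[":
--             return rng[1:]
--         if rule == "]":
--             return rng[:-1]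
--         return rng
--
--     def charf(i, c):
--         if rule == ":l":
--             return c.lower()
--         if rule == ":u":
--             return c.upper()
--         if rule == ":c":
--             return c.upper() if i == 0 else c.lower()
--         if rule == "t":
--             return c.lower() if c.isupper() else c.upper()
--         return c
--
--     pre = rule[1:] if rule.startswith("^") else ""
--     suf = rule[1:] if rule.startswith("$") else ""
--     return "\n".join(
--         f"{w} -> {pre + ''.join(charf(i, w[j]) for i, j in enumerate(sel(len(w)))) + suf}"
--         for w in words
--     )
-- ===== Notes on version B (the rewrite author's own statement) =====
-- stated objective: alternative
-- what changed: B replaces A's per-word chain of dedicated string operations (slices, concatenations, case methods) by a uniform gather engine: the rule is compiled once into an index-selection over the word's positions, a position-aware per-character map, and optional prefix/suffix, and every word is produced by one generic gather pass over that selection.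
import Mathlib
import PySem

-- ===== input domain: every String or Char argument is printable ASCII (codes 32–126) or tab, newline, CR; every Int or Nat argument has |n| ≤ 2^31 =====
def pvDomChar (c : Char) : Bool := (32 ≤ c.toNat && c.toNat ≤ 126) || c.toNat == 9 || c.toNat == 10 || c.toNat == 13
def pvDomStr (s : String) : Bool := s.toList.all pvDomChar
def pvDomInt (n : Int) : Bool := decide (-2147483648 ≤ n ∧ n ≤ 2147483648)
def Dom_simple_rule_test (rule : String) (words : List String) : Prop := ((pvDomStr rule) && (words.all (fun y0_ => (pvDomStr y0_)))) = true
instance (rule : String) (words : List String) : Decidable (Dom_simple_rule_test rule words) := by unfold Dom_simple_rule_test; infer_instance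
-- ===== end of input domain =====

-- B compiles the rule to an index-selection over word positions plus a position-aware per-character map and
-- optional affixes, and every word is produced by one generic gather pass, instead of A's per-word chain of
-- dedicated string operations (slices, concatenations, case methods). Objective: alternative decomposition.

-- Hand ports of Python string operations not in PySem (exact on the ASCII domain), used by A:
-- str.capitalize(): first character upper-cased, the rest lower-cased (exact for ASCII)
def pyCapitalize (w : String) : String :=
  match w.toList with
  | [] => w
  | c :: cs => String.ofList (PySem.Chars.upperChar c :: PySem.Chars.lower cs)

-- w[i] as a one-character string; every caller guards w non-empty, so the none branch is unreachable
def pyCharStr (w : String) (i : Int) : String :=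
  match PySem.Str.pyGet? w i with
  | some c => String.ofList [c]
  | none => ""

-- w[::-1]; step -1 never yields none
def pyReverse (w : String) : String :=
  (PySem.Str.slice? w none none (-1)).getD w

-- ''.join([c.lower() if c.isupper() else c.upper() for c in w]) (exact for ASCII)
def pySwapcase (w : String) : String :=
  PySem.Str.join "" (w.toList.map (fun c =>
    if PySem.Chars.isupper c then String.ofList [PySem.Chars.lowerChar c] else String.ofList [PySem.Chars.upperChar c]))

-- ===== PORT A =====
-- the body of A's per-word if/elif chain (the loop's `result`)
def aApply (rule word : String) : String :=
  if rule = ":l" then PySem.Str.lower word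
  else if rule = ":u" then PySem.Str.upper word
  else if rule = ":c" then pyCapitalize word
  else if rule = "r" then pyReverse word
  else if rule = "d" then word ++ word
  else if rule = "t" then pySwapcase word
  else if rule = "{" then (if word.toList ≠ [] then PySem.Str.slice word (some 1) none ++ pyCharStr word 0 else word)
  else if rule = "}" then (if word.toList ≠ [] then pyCharStr word (-1) ++ PySem.Str.slice word none (some (-1)) else word)
  else if rule = "[" then (if word.toList ≠ [] then PySem.Str.slice word (some 1) none else word)
  else if rule = "]" then (if word.toList ≠ [] then PySem.Str.slice word none (some (-1)) else word)
  else if PySem.Str.startswith rule "$" then word ++ PySem.Str.slice rule (some 1) none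
  else if PySem.Str.startswith rule "^" then PySem.Str.slice rule (some 1) none ++ word
  else word

def simple_rule_test (rule : String) (words : List String) : String :=
  let results := words.foldl (fun results word =>
    let result := aApply rule word
    results ++ [word ++ " -> " ++ result]) []
  PySem.Str.join "\n" results

-- ===== PORT B =====
-- sel(n): the selection of source positions the rule reads, in output order
def bSel (rule : String) (n : Nat) : List Nat :=
  let rng := List.range n
  if rule = "r" then (PySem.List.slice? rng none none (-1)).getD rng
  else if rule = "d" then rng ++ rng
  else if rule = "{" then PySem.List.slice rng (some 1) none ++ PySem.List.slice rng none (some 1)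
  else if rule = "}" then PySem.List.slice rng (some (-1)) none ++ PySem.List.slice rng none (some (-1))
  else if rule = "[" then PySem.List.slice rng (some 1) none
  else if rule = "]" then PySem.List.slice rng none (some (-1))
  else rng

-- charf(i, c): the position-aware per-character map of the rule
def bCharf (rule : String) (i : Int) (c : Char) : Char :=
  if rule = ":l" then PySem.Chars.lowerChar c
  else if rule = ":u" then PySem.Chars.upperChar c
  else if rule = ":c" then (if i = 0 then PySem.Chars.upperChar c else PySem.Chars.lowerChar c)
  else if rule = "t" then (if PySem.Chars.isupper c then PySem.Chars.lowerChar c else PySem.Chars.upperChar c)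
  else c

-- the gather pass: ''.join(charf(i, w[j]) for i, j in enumerate(sel(len(w))))
def bGather (rule : String) (w : String) : String :=
  String.ofList ((PySem.List.enumerate (bSel rule w.toList.length)).map
    (fun p => bCharf rule p.1 (w.toList.getD p.2 ' ')))

def simple_rule_test_alt (rule : String) (words : List String) : String :=
  let pre := if PySem.Str.startswith rule "^" then PySem.Str.slice rule (some 1) none else ""
  let suf := if PySem.Str.startswith rule "$" then PySem.Str.slice rule (some 1) none else ""
  PySem.Str.join "\n" (words.map (fun w => w ++ " -> " ++ (pre ++ bGather rule w ++ suf)))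

-- ===== PRECONDITION & SPEC =====
def Spec_simple_rule_test (rule : String) (words : List String) (out : String) : Prop := out = simple_rule_test_alt rule words
instance (rule : String) (words : List String) (out : String) : Decidable (Spec_simple_rule_test rule words out) := by unfold Spec_simple_rule_test; infer_instance

-- ===== CLAIM (what is proved, stated in full; the proofs are below) =====
def Claim_equal_simple_rule_test : Prop := ∀ (rule : String) (words : List String), Dom_simple_rule_test rule words → Spec_simple_rule_test rule words (simple_rule_test rule words)

-- ===== LEMMAS AND PROOFS =====


-- mapping over enumerate with a function reading only the element is mapping over the list
lemma enumMap (xs : List Char) (l : List Nat) (s : Int) (f : Char → Char) :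
    List.map (fun p => f (xs[p.2]?.getD ' ')) (PySem.List.enumerate l s)
      = List.map (fun j => f (xs[j]?.getD ' ')) l := by
  induction l generalizing s with
  | nil => simp [PySem.List.enumerate_nil]
  | cons a l ih => simp [PySem.List.enumerate_cons, ih]

lemma enumMapId (xs : List Char) (l : List Nat) (s : Int) :
    List.map (fun p => xs[p.2]?.getD ' ') (PySem.List.enumerate l s)
      = List.map (fun j => xs[j]?.getD ' ') l := by
  induction l generalizing s with
  | nil => simp [PySem.List.enumerate_nil]
  | cons a l ih => simp [PySem.List.enumerate_cons, ih]

-- gathering the first k positions of xs is take k (under a char map)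
lemma takeMap (xs : List Char) (f : Char → Char) (k : Nat) (h : k ≤ xs.length) :
    List.map (fun j => f (xs[j]?.getD ' ')) (List.range k) = (xs.take k).map f := by
  apply List.ext_getElem
  · simp [h]
  · intro i h1 h2
    simp at h1
    simp [List.getElem?_eq_getElem (show i < xs.length by omega)]

lemma allMap (xs : List Char) (f : Char → Char) :
    List.map (fun j => f (xs[j]?.getD ' ')) (List.range xs.length) = xs.map f := by
  simpa using takeMap xs f xs.length le_rfl

lemma allMapId (xs : List Char) :
    List.map (fun j => xs[j]?.getD ' ') (List.range xs.length) = xs := by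
  simpa using allMap xs id

lemma takeMapId (xs : List Char) (k : Nat) (h : k ≤ xs.length) :
    List.map (fun j => xs[j]?.getD ' ') (List.range k) = xs.take k := by
  simpa using takeMap xs id k h

-- gathering positions 1..|cs| of c :: cs is cs
lemma shiftMapId (c : Char) (cs : List Char) :
    List.map (fun j => (c :: cs)[j]?.getD ' ') (List.range' 1 cs.length) = cs := by
  rw [List.range'_eq_map_range, List.map_map]
  have h : ((fun j => (c :: cs)[j]?.getD ' ') ∘ (1 + ·)) = (fun j => cs[j]?.getD ' ') := by
    funext j; simp [Nat.add_comm 1 j]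
  rw [h, takeMapId cs cs.length le_rfl, List.take_length]

-- with a start ≥ 1 the i = 0 branch of an enumerate-map never fires
lemma cap_aux (xs : List Char) (f g : Char → Char) (l : List Nat) (s : Int) (hs : 1 ≤ s) :
    (PySem.List.enumerate l s).map
        (fun p => if p.1 = 0 then f (xs[p.2]?.getD ' ') else g (xs[p.2]?.getD ' '))
      = l.map (fun j => g (xs[j]?.getD ' ')) := by
  induction l generalizing s with
  | nil => simp [PySem.List.enumerate_nil]
  | cons a l ih =>
    rw [PySem.List.enumerate_cons]
    simp only [List.map_cons]
    rw [if_neg (show ¬ (((s, a) : Int × Nat).1 = 0) by simp; omega), ih (s+1) (by omega)]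

-- the gather pass of rule ":c" is capitalize
lemma cap_lemma (c : Char) (cs : List Char) :
    (PySem.List.enumerate (List.range (c :: cs).length) 0).map
        (fun p => if p.1 = 0 then PySem.Chars.upperChar ((c :: cs)[p.2]?.getD ' ')
                  else PySem.Chars.lowerChar ((c :: cs)[p.2]?.getD ' '))
      = PySem.Chars.upperChar c :: cs.map PySem.Chars.lowerChar := by
  rw [show (c :: cs).length = cs.length + 1 from rfl, List.range_succ_eq_map,
    PySem.List.enumerate_cons]
  simp only [List.map_cons]
  rw [cap_aux _ _ _ _ _ (by omega), List.map_map]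
  have h : ((fun j => PySem.Chars.lowerChar ((c :: cs)[j]?.getD ' ')) ∘ Nat.succ)
      = fun j => PySem.Chars.lowerChar (cs[j]?.getD ' ') := by
    funext j; simp
  simp only [h]
  rw [allMap]
  simp

-- a "$..." rule does not start with "^" and vice versa
lemma starts_excl (rule : String) (a b : Char) (hab : a ≠ b)
    (h : PySem.Str.startswith rule (String.ofList [a]) = true) :
    PySem.Str.startswith rule (String.ofList [b]) = false := by
  simp only [PySem.Str.startswith_eq] at h ⊢
  rw [PySem.Chars.startswith_iff] at h
  by_contra hc
  simp only [Bool.not_eq_false] at hc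
  rw [PySem.Chars.startswith_iff] at hc
  obtain ⟨t1, e1⟩ := h
  obtain ⟨t2, e2⟩ := hc
  simp only [String.toList_ofList] at e1 e2
  rw [← e1] at e2
  have : b = a := by
    have := congrArg (fun l => l.headI) e2
    simpa using this
  exact hab this.symm

-- A's per-word dispatch result equals B's affix + gather result, rule by rule
lemma key (rule w : String) :
    aApply rule w =
      (if PySem.Str.startswith rule "^" then PySem.Str.slice rule (some 1) none else "")
        ++ bGather rule w
        ++ (if PySem.Str.startswith rule "$" then PySem.Str.slice rule (some 1) none else "") := by
  rcases eq_or_ne rule ":l" with rfl | h1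
  · apply String.toList_inj.mp
    simp [aApply, bGather, bSel, bCharf, enumMap, PySem.Chars.lower,
      show PySem.Chars.startswith [':', 'l'] ['^'] = false from by decide,
      show PySem.Chars.startswith [':', 'l'] ['$'] = false from by decide]
    rw [← String.length_toList, allMap]
  rcases eq_or_ne rule ":u" with rfl | h2
  · apply String.toList_inj.mp
    simp [aApply, bGather, bSel, bCharf, enumMap, PySem.Chars.upper,
      show PySem.Chars.startswith [':', 'u'] ['^'] = false from by decide,
      show PySem.Chars.startswith [':', 'u'] ['$'] = false from by decide]
    rw [← String.length_toList, allMap]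
  rcases eq_or_ne rule ":c" with rfl | h3
  · apply String.toList_inj.mp
    cases hx : w.toList with
    | nil =>
      simp [aApply, pyCapitalize, bGather, bSel, bCharf, hx,
        show PySem.Chars.startswith [':', 'c'] ['^'] = false from by decide,
        show PySem.Chars.startswith [':', 'c'] ['$'] = false from by decide]
    | cons c cs =>
      simp [aApply, pyCapitalize, bGather, bSel, bCharf, hx, PySem.Chars.lower,
        show PySem.Chars.startswith [':', 'c'] ['^'] = false from by decide,
        show PySem.Chars.startswith [':', 'c'] ['$'] = false from by decide]
      rw [show cs.length + 1 = (c :: cs).length from rfl, cap_lemma]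
  rcases eq_or_ne rule "r" with rfl | h4
  · apply String.toList_inj.mp
    simp [aApply, pyReverse, bGather, bSel, bCharf, enumMapId,
      PySem.Str.slice?_none_none_neg_one, PySem.List.slice?_none_none_neg_one,
      show PySem.Chars.startswith ['r'] ['^'] = false from by decide,
      show PySem.Chars.startswith ['r'] ['$'] = false from by decide]
    rw [← String.length_toList, allMapId]
  rcases eq_or_ne rule "d" with rfl | h5
  · apply String.toList_inj.mp
    simp [aApply, bGather, bSel, bCharf, enumMapId,
      show PySem.Chars.startswith ['d'] ['^'] = false from by decide,
      show PySem.Chars.startswith ['d'] ['$'] = false from by decide]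
    rw [← String.length_toList, allMapId]
  rcases eq_or_ne rule "t" with rfl | h6
  · apply String.toList_inj.mp
    simp [aApply, pySwapcase, bGather, bSel, bCharf,
      show PySem.Chars.startswith ['t'] ['^'] = false from by decide,
      show PySem.Chars.startswith ['t'] ['$'] = false from by decide]
    rw [← String.length_toList]
    rw [enumMap w.toList (List.range w.toList.length) 0
        (fun c => if PySem.Chars.isupper c then PySem.Chars.lowerChar c else PySem.Chars.upperChar c),
      allMap w.toList (fun c => if PySem.Chars.isupper c then PySem.Chars.lowerChar c else PySem.Chars.upperChar c),
      show (String.toList ∘ fun c =>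
          if PySem.Chars.isupper c = true then String.ofList [PySem.Chars.lowerChar c]
          else String.ofList [PySem.Chars.upperChar c])
        = (fun a => [a]) ∘ (fun c =>
            if PySem.Chars.isupper c then PySem.Chars.lowerChar c else PySem.Chars.upperChar c) from by
          funext c; by_cases h : PySem.Chars.isupper c <;> simp [h],
      ← List.map_map, PySem.Chars.join_nil_singletons]
  rcases eq_or_ne rule "{" with rfl | h7
  · apply String.toList_inj.mp
    cases hx : w.toList with
    | nil =>
      simp [aApply, bGather, bSel, bCharf, hx, PySem.List.slice,
        show PySem.Chars.startswith ['{'] ['^'] = false from by decide,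
        show PySem.Chars.startswith ['{'] ['$'] = false from by decide]
    | cons c cs =>
      simp [aApply, pyCharStr, bGather, bSel, bCharf, hx, enumMapId, shiftMapId,
        PySem.List.slice_from_one, PySem.List.slice_to,
        show PySem.Chars.startswith ['{'] ['^'] = false from by decide,
        show PySem.Chars.startswith ['{'] ['$'] = false from by decide]
  rcases eq_or_ne rule "}" with rfl | h8
  · apply String.toList_inj.mp
    rcases List.eq_nil_or_concat w.toList with hx | ⟨ys, a, hx⟩
    · simp [aApply, bGather, bSel, bCharf, hx, PySem.List.slice,
        show PySem.Chars.startswith ['}'] ['^'] = false from by decide,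
        show PySem.Chars.startswith ['}'] ['$'] = false from by decide]
    · simp [aApply, pyCharStr, bGather, bSel, bCharf, hx, enumMapId,
        PySem.List.slice_from_neg_one, PySem.List.slice_to_neg_one,
        PySem.List.pyGet?_neg_one_append_singleton,
        show PySem.Chars.startswith ['}'] ['^'] = false from by decide,
        show PySem.Chars.startswith ['}'] ['$'] = false from by decide]
      rw [takeMapId (ys ++ [a]) (ys.length + 1) (by simp)]
      simp [List.drop_left', List.take_of_length_le]
  rcases eq_or_ne rule "[" with rfl | h9
  · apply String.toList_inj.mp
    cases hx : w.toList with
    | nil =>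
      simp [aApply, bGather, bSel, bCharf, hx, PySem.List.slice,
        show PySem.Chars.startswith ['['] ['^'] = false from by decide,
        show PySem.Chars.startswith ['['] ['$'] = false from by decide]
    | cons c cs =>
      simp [aApply, bGather, bSel, bCharf, hx, enumMapId, shiftMapId,
        PySem.List.slice_from_one,
        show PySem.Chars.startswith ['['] ['^'] = false from by decide,
        show PySem.Chars.startswith ['['] ['$'] = false from by decide]
  rcases eq_or_ne rule "]" with rfl | h10
  · apply String.toList_inj.mp
    cases hx : w.toList with
    | nil =>
      simp [aApply, bGather, bSel, bCharf, hx, PySem.List.slice,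
        show PySem.Chars.startswith [']'] ['^'] = false from by decide,
        show PySem.Chars.startswith [']'] ['$'] = false from by decide]
    | cons c cs =>
      simp [aApply, bGather, bSel, bCharf, hx, enumMapId,
        PySem.List.slice_to_neg_one,
        show PySem.Chars.startswith [']'] ['^'] = false from by decide,
        show PySem.Chars.startswith [']'] ['$'] = false from by decide]
      rw [takeMapId (c :: cs) (cs.length + 1) (by simp)]
      simp [List.take_of_length_le]
  by_cases hd : PySem.Str.startswith rule "$" = true
  · have hu : PySem.Str.startswith rule "^" = false :=
      starts_excl rule '$' '^' (by decide) hd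
    simp only [PySem.Str.startswith_eq,
      show ("$" : String).toList = ['$'] from by decide,
      show ("^" : String).toList = ['^'] from by decide] at hd hu
    apply String.toList_inj.mp
    simp [aApply, bGather, bSel, bCharf, enumMapId,
      h1, h2, h3, h4, h5, h6, h7, h8, h9, h10, hd, hu]
    rw [← String.length_toList, allMapId]
  by_cases hu : PySem.Str.startswith rule "^" = true
  · simp only [PySem.Str.startswith_eq,
      show ("$" : String).toList = ['$'] from by decide,
      show ("^" : String).toList = ['^'] from by decide] at hd hu
    apply String.toList_inj.mp
    simp [aApply, bGather, bSel, bCharf, enumMapId,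
      h1, h2, h3, h4, h5, h6, h7, h8, h9, h10, hd, hu]
    rw [← String.length_toList, allMapId]
  · simp only [PySem.Str.startswith_eq,
      show ("$" : String).toList = ['$'] from by decide,
      show ("^" : String).toList = ['^'] from by decide] at hd hu
    apply String.toList_inj.mp
    simp [aApply, bGather, bSel, bCharf, enumMapId,
      h1, h2, h3, h4, h5, h6, h7, h8, h9, h10, hd, hu]
    rw [← String.length_toList, allMapId]

-- ===== VERDICT (by name: the statement is the Claim_ definition above) =====
theorem simple_rule_test_spec : Claim_equal_simple_rule_test := by
  intro rule words _
  unfold Spec_simple_rule_test simple_rule_test simple_rule_test_alt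
  rw [PySem.List.foldl_append_singleton_eq_map]
  simp only [List.nil_append]
  exact congrArg (PySem.Str.join "\n")
    (List.map_congr_left fun w _ => by rw [key rule w])
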